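-- pv_equiv track=rewrite | github.com/choco9966/Algorithm-Master | elice/데이터 구조/재귀호출 응용 및 힙/점토놀이.py | getMinForce
-- ===== SOURCE A (Python) =====
-- class priorityQueue:
--     '''
--     우선순위 큐를 힙으로 구현합니다
--     '''
--
--     def __init__(self) :
--         self.data = [0]
--
--     def push(self, value) :
--         '''
--         우선순위 큐에 value를 삽입합니다
--         '''
--         self.data.append(value)
--         idx = len(self.data) - 1
--         while idx > 0 :
--             if self.data[idx//2] > self.data[idx] :
--                 self.data[idx],self.data[idx//2] = self.data[idx//2],self.data[idx]
--                 idx = idx // 2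
--             else :
--                 break
--
--     def top(self) :
--         '''
--         우선순위가 가장 높은 원소를 반환합니다
--         '''
--         if len(self.data) == 1 :
--             return -1
--         else :
--             return self.data[1]
--
--     def pop(self) :
--         '''
--         우선순위가 가장 높은 원소를 제거합니다.
--         '''
--         if len(self.data) != 1 :
--             self.data[1] = self.data[len(self.data)-1]
--             self.data.pop()
--             idx = 1
--             data_size = len(self.data)
--             while idx < data_size :
--                 swap_idx = idx * 2
--                 if swap_idx+1 < data_size and self.data[idx*2] > self.data[idx*2+1] :
--                     swap_idx += 1
--                 if swap_idx < data_size and self.data[swap_idx] < self.data[idx] :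
--                     self.data[swap_idx],self.data[idx] = self.data[idx],self.data[swap_idx]
--                     idx = swap_idx
--                 else :
--                     break
--
-- def getMinForce(weights) :
--     '''
--     n개의 점토를 하나로 합치기 위해 필요한 힘의 합의 최솟값을 반환하는 함수를 작성하세요.
--     '''
--
--     result = 0
--     myPQ = priorityQueue()
--
--     for weight in weights :
--         myPQ.push(weight)
--     while True :
--         if myPQ.top() == -1 :
--             break
--         a = myPQ.top()
--         myPQ.pop()
--         b = myPQ.top()
--         myPQ.pop()
--         if b == -1 :
--             break
--         result += a + b
--         myPQ.push(a+b)
--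
--     return result
-- ===== SOURCE B (Python) =====
-- def getMinForce(weights):
--     '''
--     n개의 점토를 하나로 합치기 위해 필요한 힘의 합의 최솟값을 반환하는 함수를 작성하세요.
--     '''
--     xs = sorted(weights)
--     result = 0
--     while len(xs) > 1:
--         s = xs[0] + xs[1]
--         result += s
--         rest = xs[2:]
--         i = 0
--         while i < len(rest) and rest[i] < s:
--             i += 1
--         xs = rest[:i] + [s] + rest[i:]
--     return result
-- ===== Notes on version B (the rewrite author's own statement) =====
-- stated objective: simpler
-- what changed: Replaces the hand-written binary heap (array sift-up/sift-down priority queue) by a single sort followed by repeatedly summing the first two elements of a sorted list and re-inserting the sum at its ordered position.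
-- outside the precondition, e.g. on getMinForce([2, -1]): A returns 2, B returns 1; on getMinForce([-1, -1]): A returns 0, B returns -2; on getMinForce([3, -2, -1, 5]): A returns 0, B returns 2
import Mathlib
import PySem

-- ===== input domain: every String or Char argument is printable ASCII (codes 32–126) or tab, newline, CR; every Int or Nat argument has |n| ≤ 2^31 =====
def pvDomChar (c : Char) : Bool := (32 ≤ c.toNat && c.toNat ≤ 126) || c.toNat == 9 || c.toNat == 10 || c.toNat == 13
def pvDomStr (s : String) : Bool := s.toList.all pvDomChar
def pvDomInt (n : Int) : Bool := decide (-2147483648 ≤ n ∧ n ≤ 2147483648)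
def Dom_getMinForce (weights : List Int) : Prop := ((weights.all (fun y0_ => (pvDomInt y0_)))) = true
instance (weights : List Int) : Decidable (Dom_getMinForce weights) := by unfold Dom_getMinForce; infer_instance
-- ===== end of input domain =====

-- B replaces A's hand-written binary-heap priority queue by one sort plus ordered re-insertion of each
-- merged sum (simpler, no speed claim). Equivalence is proved on lists of nonnegative weights (Pre_).

-- ===== PORT A =====
-- Python tuple swap d[i], d[j] = d[j], d[i]  (all swaps A performs are at in-range indices, so getD is exact)
def pvSwap (d : List Int) (i j : Nat) : List Int := (d.set i (d.getD j 0)).set j (d.getD i 0)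

-- push's sift-up loop: while idx > 0: if data[idx//2] > data[idx]: swap; idx //= 2 else break
def pvSiftUp (d : List Int) (idx : Nat) : List Int :=
  if h : 0 < idx then
    if d.getD (idx / 2) 0 > d.getD idx 0 then pvSiftUp (pvSwap d idx (idx / 2)) (idx / 2) else d
  else d
termination_by idx
decreasing_by exact Nat.div_lt_self h (by omega)

def pvPush (d : List Int) (v : Int) : List Int := pvSiftUp (d ++ [v]) ((d ++ [v]).length - 1)

def pvTop (d : List Int) : Int := if d.length = 1 then -1 else d.getD 1 0

-- swap_idx computation of pop's sift-down loop
def pvChoose (d : List Int) (sz idx : Nat) : Nat :=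
  if idx * 2 + 1 < sz ∧ d.getD (idx * 2) 0 > d.getD (idx * 2 + 1) 0 then idx * 2 + 1 else idx * 2

-- needed by pvSiftDown's termination proof
theorem pvChoose_gt (d : List Int) (sz idx : Nat)
    (h : d.getD (pvChoose d sz idx) 0 < d.getD idx 0) : idx < pvChoose d sz idx := by
  by_cases hc : idx * 2 + 1 < sz ∧ d.getD (idx * 2) 0 > d.getD (idx * 2 + 1) 0
  · simp only [pvChoose, if_pos hc]; omega
  · simp only [pvChoose, if_neg hc] at h ⊢
    rcases Nat.eq_zero_or_pos idx with h0 | h0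
    · subst h0; simp at h
    · omega

-- pop's sift-down loop: while idx < data_size: …
def pvSiftDown (sz : Nat) (d : List Int) (idx : Nat) : List Int :=
  if _ : idx < sz then
    if h2 : pvChoose d sz idx < sz ∧ d.getD (pvChoose d sz idx) 0 < d.getD idx 0 then
      pvSiftDown sz (pvSwap d (pvChoose d sz idx) idx) (pvChoose d sz idx)
    else d
  else d
termination_by sz - idx
decreasing_by have := pvChoose_gt d sz idx h2.2; omega

def pvPop (d : List Int) : List Int :=
  if d.length ≠ 1 then
    pvSiftDown ((d.set 1 (d.getD (d.length - 1) 0)).dropLast).length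
      ((d.set 1 (d.getD (d.length - 1) 0)).dropLast) 1
  else d

-- the main while-True loop of getMinForce; fuel (weights.length + 4) always suffices, the loop
-- pops two elements and pushes one per iteration
def pvLoop (fuel : Nat) (d : List Int) (result : Int) : Int :=
  match fuel with
  | 0 => result
  | fuel + 1 =>
    if pvTop d = -1 then result
    else
      let a := pvTop d
      let d1 := pvPop d
      let b := pvTop d1
      let d2 := pvPop d1
      if b = -1 then result
      else pvLoop fuel (pvPush d2 (a + b)) (result + (a + b))

def getMinForce (weights : List Int) : Int :=
  pvLoop (weights.length + 4) (weights.foldl pvPush [0]) 0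

-- ===== PORT B =====
-- insertion of s before the first element ≥ s (the index scan + slicing of Source B)
def pvIns (s : Int) : List Int → List Int
  | [] => [s]
  | x :: xs => if x < s then x :: pvIns s xs else s :: x :: xs

-- needed by pvMerge's termination proof
theorem pvIns_length (s : Int) (l : List Int) : (pvIns s l).length = l.length + 1 := by
  induction l with
  | nil => rfl
  | cons x xs ih => simp only [pvIns]; split <;> simp [ih]

-- Source B's while-loop: sum the two smallest, re-insert the sum in order
def pvMerge : List Int → Int → Int
  | a :: b :: rest, result => pvMerge (pvIns (a + b) rest) (result + (a + b))
  | _, result => result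
termination_by xs _ => xs.length
decreasing_by simp [pvIns_length]

def getMinForce_alt (weights : List Int) : Int :=
  pvMerge (PySem.List.sorted weights (fun x => x) false) 0

-- ===== PRECONDITION & SPEC =====
-- Pre_ restricts to nonnegative weights, the task's natural domain (clay weights): A's priority queue
-- reserves the value -1 as its out-of-band empty marker and a zero sentinel at the root slot, so the
-- function is unspecified for negative weights and A and B may legitimately disagree there.
def Pre_getMinForce (weights : List Int) : Prop := ∀ w ∈ weights, 0 ≤ w
instance (weights : List Int) : Decidable (Pre_getMinForce weights) := by unfold Pre_getMinForce; infer_instance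

def pvWitness_getMinForce : List Int := [3, 1, 2, 2]

def Spec_getMinForce (weights : List Int) (out : Int) : Prop := out = getMinForce_alt weights
instance (weights : List Int) (out : Int) : Decidable (Spec_getMinForce weights out) := by unfold Spec_getMinForce; infer_instance

-- ===== CLAIM (what is proved, stated in full; the proofs are below) =====
def Claim_equal_getMinForce : Prop := ∀ (weights : List Int), Dom_getMinForce weights → Pre_getMinForce weights → Spec_getMinForce weights (getMinForce weights)

-- ===== LEMMAS AND PROOFS =====

-- the heap invariant A's priority queue maintains on nonnegative inputs
def HeapNN (d : List Int) : Prop :=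
  d.getD 0 0 = 0 ∧ ∀ i, 1 ≤ i → i < d.length → 0 ≤ d.getD i 0
def IsHeap (d : List Int) : Prop :=
  ∀ i, 2 ≤ i → i < d.length → d.getD (i / 2) 0 ≤ d.getD i 0
def HeapInv (d : List Int) : Prop := 1 ≤ d.length ∧ HeapNN d ∧ IsHeap d

theorem length_swap (d : List Int) (i j : Nat) : (pvSwap d i j).length = d.length := by
  simp [pvSwap]

theorem getD_swap (d : List Int) (i j k : Nat) (hi : i < d.length) (hj : j < d.length) :
    (pvSwap d i j).getD k 0 = if k = j then d.getD i 0 else if k = i then d.getD j 0 else d.getD k 0 := by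
  by_cases hkj : k = j <;> by_cases hki : k = i <;>
    simp_all [pvSwap, List.getD_eq_getElem?_getD, List.getElem?_set, eq_comm]

theorem cons_getD_set_perm (x : Int) (t : List Int) (m : Nat) (hm : m < t.length) :
    (t.getD m 0 :: t.set m x).Perm (x :: t) := by
  induction t generalizing m with
  | nil => simp at hm
  | cons y ys ih =>
    cases m with
    | zero => simpa using List.Perm.swap x y ys
    | succ k =>
      have hk : k < ys.length := by simpa using hm
      exact (List.Perm.swap y (ys.getD k 0) (ys.set k x)).trans
        (((ih k hk).cons y).trans (List.Perm.swap x y ys))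

theorem set_set_swap_perm (t : List Int) (a b : Nat) (ha : a < t.length) (hb : b < t.length) :
    ((t.set a (t.getD b 0)).set b (t.getD a 0)).Perm t := by
  induction t generalizing a b with
  | nil => simp at ha
  | cons x ts ih =>
    cases a with
    | zero =>
      cases b with
      | zero => simp
      | succ k =>
        have hk : k < ts.length := by simpa using hb
        simpa using cons_getD_set_perm x ts k hk
    | succ j =>
      cases b with
      | zero =>
        have hj : j < ts.length := by simpa using ha
        simpa using cons_getD_set_perm x ts j hj
      | succ k =>
        have hj : j < ts.length := by simpa using ha
        have hk : k < ts.length := by simpa using hb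
        simpa using (ih j k hj hk).cons x

theorem swap_drop_one_perm (d : List Int) {i j : Nat} (hi1 : 1 ≤ i) (hi : i < d.length)
    (hj1 : 1 ≤ j) (hj : j < d.length) : ((pvSwap d i j).drop 1).Perm (d.drop 1) := by
  cases d with
  | nil => simp at hi
  | cons x t =>
    obtain ⟨a, rfl⟩ : ∃ a, i = a + 1 := ⟨i - 1, by omega⟩
    obtain ⟨b, rfl⟩ : ∃ b, j = b + 1 := ⟨j - 1, by omega⟩
    have ha : a < t.length := by simpa using hi
    have hb : b < t.length := by simpa using hj
    simpa [pvSwap] using set_set_swap_perm t a b ha hb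

theorem heap_min (d : List Int) (hh : IsHeap d) :
    ∀ i, 1 ≤ i → i < d.length → d.getD 1 0 ≤ d.getD i 0 := by
  intro i
  induction i using Nat.strong_induction_on with
  | _ i ih =>
    intro h1 hlen
    rcases Nat.lt_or_ge i 2 with h2 | h2
    · have : i = 1 := by omega
      subst this; exact le_refl _
    · calc d.getD 1 0 ≤ d.getD (i / 2) 0 := ih (i / 2) (by omega) (by omega) (by omega)
        _ ≤ d.getD i 0 := hh i h2 hlen

theorem siftUp_spec : ∀ (idx : Nat) (d : List Int),
    1 ≤ idx → idx < d.length →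
    HeapNN d →
    (∀ i, 2 ≤ i → i < d.length → i ≠ idx → d.getD (i / 2) 0 ≤ d.getD i 0) →
    (∀ i, 2 ≤ i → i < d.length → i / 2 = idx → d.getD (idx / 2) 0 ≤ d.getD i 0) →
    HeapInv (pvSiftUp d idx) ∧ ((pvSiftUp d idx).drop 1).Perm (d.drop 1) ∧
      (pvSiftUp d idx).length = d.length := by
  intro idx
  induction idx using Nat.strong_induction_on with
  | _ idx IH =>
    intro d hidx1 hidx hnn hex hlink
    obtain ⟨hnn0, hpos⟩ := hnn
    rw [pvSiftUp]
    rw [dif_pos (by omega : 0 < idx)]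
    by_cases hgt : d.getD (idx / 2) 0 > d.getD idx 0
    · rw [if_pos hgt]
      -- the swap case: here idx ≥ 2, since at idx = 1 the parent is the sentinel 0 ≤ d[1]
      have h2idx : 2 ≤ idx := by
        by_contra h
        have h1 : idx = 1 := by omega
        rw [h1, show (1 : Nat) / 2 = 0 from rfl, hnn0] at hgt
        have := hpos 1 le_rfl (by omega)
        omega
      set p := idx / 2 with hp
      have hp1 : 1 ≤ p := by omega
      have hplt : p < idx := by omega
      have hplen : p < d.length := by omega
      have hlen' := length_swap d idx p
      have hget : ∀ k, (pvSwap d idx p).getD k 0 =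
          if k = p then d.getD idx 0 else if k = idx then d.getD p 0 else d.getD k 0 :=
        fun k => getD_swap d idx p k hidx hplen
      have hd'nn : HeapNN (pvSwap d idx p) := by
        constructor
        · rw [hget 0, if_neg (by omega), if_neg (by omega)]; exact hnn0
        · intro i hi1 hilen
          rw [hget i]
          split_ifs
          · exact hpos idx (by omega) hidx
          · exact hpos p hp1 hplen
          · exact hpos i hi1 (by rw [hlen'] at hilen; omega)
      have hd'ex : ∀ i, 2 ≤ i → i < (pvSwap d idx p).length → i ≠ p →
          (pvSwap d idx p).getD (i / 2) 0 ≤ (pvSwap d idx p).getD i 0 := by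
        intro i hi2 hilen hip
        rw [hlen'] at hilen
        by_cases hieq : i = idx
        · rw [hieq]
          have e1 : (pvSwap d idx p).getD idx 0 = d.getD p 0 := by
            rw [hget idx, if_neg (by omega), if_pos rfl]
          have e2 : (pvSwap d idx p).getD (idx / 2) 0 = d.getD idx 0 := by
            rw [hget (idx / 2), if_pos hp.symm]
          rw [e1, e2]
          exact le_of_lt hgt
        · by_cases hci : i / 2 = idx
          · have e1 : (pvSwap d idx p).getD i 0 = d.getD i 0 := by
              rw [hget i, if_neg (by omega), if_neg hieq]
            have e2 : (pvSwap d idx p).getD (i / 2) 0 = d.getD p 0 := by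
              rw [hget (i / 2), if_neg (by omega : ¬ i / 2 = p), if_pos hci]
            rw [e1, e2]
            exact hlink i hi2 hilen hci
          · by_cases hcp : i / 2 = p
            · have e1 : (pvSwap d idx p).getD i 0 = d.getD i 0 := by
                rw [hget i, if_neg hip, if_neg hieq]
              have e2 : (pvSwap d idx p).getD (i / 2) 0 = d.getD idx 0 := by
                rw [hget (i / 2), if_pos hcp]
              rw [e1, e2]
              have h3 := hex i hi2 hilen hieq
              rw [hcp] at h3
              omega
            · have e1 : (pvSwap d idx p).getD i 0 = d.getD i 0 := by
                rw [hget i, if_neg hip, if_neg hieq]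
              have e2 : (pvSwap d idx p).getD (i / 2) 0 = d.getD (i / 2) 0 := by
                rw [hget (i / 2), if_neg hcp, if_neg hci]
              rw [e1, e2]
              exact hex i hi2 hilen hieq
      have hd'link : ∀ i, 2 ≤ i → i < (pvSwap d idx p).length → i / 2 = p →
          (pvSwap d idx p).getD (p / 2) 0 ≤ (pvSwap d idx p).getD i 0 := by
        intro i hi2 hilen hci
        rw [hlen'] at hilen
        have hppd : d.getD (p / 2) 0 ≤ d.getD p 0 := by
          rcases Nat.lt_or_ge p 2 with hplt2 | hpge2
          · have hp1' : p = 1 := by omega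
            rw [hp1', show (1 : Nat) / 2 = 0 from rfl, hnn0]
            exact hpos 1 le_rfl (by omega)
          · exact hex p hpge2 hplen (by omega)
        have e0 : (pvSwap d idx p).getD (p / 2) 0 = d.getD (p / 2) 0 := by
          rw [hget (p / 2), if_neg (by omega), if_neg (by omega)]
        by_cases hieq : i = idx
        · rw [hieq]
          have e1 : (pvSwap d idx p).getD idx 0 = d.getD p 0 := by
            rw [hget idx, if_neg (by omega), if_pos rfl]
          rw [e0, e1]
          exact hppd
        · have e1 : (pvSwap d idx p).getD i 0 = d.getD i 0 := by
            rw [hget i, if_neg (by omega : ¬ i = p), if_neg hieq]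
          rw [e0, e1]
          have h3 := hex i hi2 hilen hieq
          rw [hci] at h3
          exact le_trans hppd h3
      obtain ⟨hinv', hperm', hlen''⟩ :=
        IH p hplt (pvSwap d idx p) hp1 (by rw [hlen']; omega) hd'nn hd'ex hd'link
      exact ⟨hinv', hperm'.trans (swap_drop_one_perm d (by omega) hidx hp1 hplen), by omega⟩
    · rw [if_neg hgt]
      refine ⟨⟨by omega, ⟨hnn0, hpos⟩, ?_⟩, List.Perm.refl _, rfl⟩
      intro i hi2 hilen
      by_cases hieq : i = idx
      · subst hieq; omega
      · exact hex i hi2 hilen hieq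

theorem siftDown_spec : ∀ (fuel sz : Nat) (d : List Int) (idx : Nat),
    sz - idx ≤ fuel → sz = d.length → 1 ≤ idx → 1 ≤ d.length →
    HeapNN d →
    (∀ i, 2 ≤ i → i < d.length → i / 2 ≠ idx → d.getD (i / 2) 0 ≤ d.getD i 0) →
    (∀ i, 2 ≤ i → i < d.length → i / 2 = idx → 2 ≤ idx → d.getD (idx / 2) 0 ≤ d.getD i 0) →
    HeapInv (pvSiftDown sz d idx) ∧ ((pvSiftDown sz d idx).drop 1).Perm (d.drop 1) ∧
      (pvSiftDown sz d idx).length = d.length := by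
  intro fuel
  induction fuel with
  | zero =>
    intro sz d idx hfuel hsz hidx1 hlen hnn hex hlink
    have hstop : ¬ idx < sz := by omega
    rw [pvSiftDown, dif_neg hstop]
    refine ⟨⟨hlen, hnn, ?_⟩, List.Perm.refl _, rfl⟩
    intro i hi2 hilen
    exact hex i hi2 hilen (by omega)
  | succ fuel IH =>
    intro sz d idx hfuel hsz hidx1 hlen hnn hex hlink
    obtain ⟨hnn0, hpos⟩ := hnn
    rw [pvSiftDown]
    by_cases hin : idx < sz
    · rw [dif_pos hin]
      set sw := pvChoose d sz idx with hswdef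
      have hsw2 : sw = idx * 2 ∨ sw = idx * 2 + 1 := by
        rw [hswdef]; unfold pvChoose; split
        · right; rfl
        · left; rfl
      have hswhalf : sw / 2 = idx := by omega
      have hswmin : ∀ o, o = idx * 2 ∨ o = idx * 2 + 1 → o < sz → o ≠ sw →
          d.getD sw 0 ≤ d.getD o 0 := by
        intro o ho holt hosw
        by_cases hc : idx * 2 + 1 < sz ∧ d.getD (idx * 2) 0 > d.getD (idx * 2 + 1) 0
        · have hsw : sw = idx * 2 + 1 := by rw [hswdef]; unfold pvChoose; rw [if_pos hc]
          have ho' : o = idx * 2 := by omega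
          rw [ho', hsw]
          exact le_of_lt hc.2
        · have hsw : sw = idx * 2 := by rw [hswdef]; unfold pvChoose; rw [if_neg hc]
          have ho' : o = idx * 2 + 1 := by omega
          rw [ho', hsw]
          have hnb : ¬ d.getD (idx * 2) 0 > d.getD (idx * 2 + 1) 0 := fun hb => hc ⟨by omega, hb⟩
          omega
      by_cases hcond : sw < sz ∧ d.getD sw 0 < d.getD idx 0
      · rw [dif_pos hcond]
        obtain ⟨hswlt, hswval⟩ := hcond
        have hswgt : idx < sw := pvChoose_gt d sz idx hswval
        have hsw1 : 1 ≤ sw := by omega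
        have hswlen : sw < d.length := by omega
        have hidxlen : idx < d.length := by omega
        have hlen' := length_swap d sw idx
        have hget : ∀ k, (pvSwap d sw idx).getD k 0 =
            if k = idx then d.getD sw 0 else if k = sw then d.getD idx 0 else d.getD k 0 :=
          fun k => getD_swap d sw idx k hswlen hidxlen
        have hd'nn : HeapNN (pvSwap d sw idx) := by
          constructor
          · rw [hget 0, if_neg (by omega), if_neg (by omega)]; exact hnn0
          · intro i hi1 hilen
            rw [hget i]
            split_ifs
            · exact hpos sw hsw1 hswlen
            · exact hpos idx hidx1 hidxlen
            · exact hpos i hi1 (by rw [hlen'] at hilen; omega)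
        have hd'ex : ∀ i, 2 ≤ i → i < (pvSwap d sw idx).length → i / 2 ≠ sw →
            (pvSwap d sw idx).getD (i / 2) 0 ≤ (pvSwap d sw idx).getD i 0 := by
          intro i hi2 hilen hci
          rw [hlen'] at hilen
          by_cases hieq : i = idx
          · rw [hieq]
            have e1 : (pvSwap d sw idx).getD idx 0 = d.getD sw 0 := by
              rw [hget idx, if_pos rfl]
            have e2 : (pvSwap d sw idx).getD (idx / 2) 0 = d.getD (idx / 2) 0 := by
              rw [hget (idx / 2), if_neg (by omega), if_neg (by omega)]
            rw [e1, e2]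
            rcases Nat.lt_or_ge idx 2 with hi1' | hi2'
            · have h1 : idx = 1 := by omega
              rw [h1, show (1 : Nat) / 2 = 0 from rfl, hnn0]
              exact hpos sw hsw1 hswlen
            · exact hlink sw (by omega) hswlen hswhalf hi2'
          · by_cases hisw : i = sw
            · rw [hisw]
              have e1 : (pvSwap d sw idx).getD sw 0 = d.getD idx 0 := by
                rw [hget sw, if_neg (by omega), if_pos rfl]
              have e2 : (pvSwap d sw idx).getD (sw / 2) 0 = d.getD sw 0 := by
                rw [hswhalf, hget idx, if_pos rfl]
              rw [e1, e2]
              exact le_of_lt hswval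
            · by_cases hchild : i / 2 = idx
              · have hior : i = idx * 2 ∨ i = idx * 2 + 1 := by omega
                have e1 : (pvSwap d sw idx).getD i 0 = d.getD i 0 := by
                  rw [hget i, if_neg hieq, if_neg hisw]
                have e2 : (pvSwap d sw idx).getD (i / 2) 0 = d.getD sw 0 := by
                  rw [hchild, hget idx, if_pos rfl]
                rw [e1, e2]
                exact hswmin i hior (by omega) hisw
              · have e1 : (pvSwap d sw idx).getD i 0 = d.getD i 0 := by
                  rw [hget i, if_neg hieq, if_neg hisw]
                have e2 : (pvSwap d sw idx).getD (i / 2) 0 = d.getD (i / 2) 0 := by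
                  rw [hget (i / 2), if_neg hchild, if_neg hci]
                rw [e1, e2]
                exact hex i hi2 hilen hchild
        have hd'link : ∀ i, 2 ≤ i → i < (pvSwap d sw idx).length → i / 2 = sw → 2 ≤ sw →
            (pvSwap d sw idx).getD (sw / 2) 0 ≤ (pvSwap d sw idx).getD i 0 := by
          intro i hi2 hilen hci _
          rw [hlen'] at hilen
          have e0 : (pvSwap d sw idx).getD (sw / 2) 0 = d.getD sw 0 := by
            rw [hswhalf, hget idx, if_pos rfl]
          have e1 : (pvSwap d sw idx).getD i 0 = d.getD i 0 := by
            rw [hget i, if_neg (by omega), if_neg (by omega)]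
          rw [e0, e1]
          have h3 := hex i hi2 hilen (by omega : i / 2 ≠ idx)
          rw [hci] at h3
          exact h3
        obtain ⟨hinv', hperm', hlen''⟩ :=
          IH sz (pvSwap d sw idx) sw (by omega) (by rw [hlen']; exact hsz) hsw1
            (by rw [hlen']; omega) hd'nn hd'ex hd'link
        exact ⟨hinv', hperm'.trans (swap_drop_one_perm d hsw1 hswlen hidx1 hidxlen), by omega⟩
      · rw [dif_neg hcond]
        refine ⟨⟨hlen, ⟨hnn0, hpos⟩, ?_⟩, List.Perm.refl _, rfl⟩
        intro i hi2 hilen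
        by_cases hchild : i / 2 = idx
        · have hior : i = idx * 2 ∨ i = idx * 2 + 1 := by omega
          have hswin : sw < sz := by
            by_cases hc : idx * 2 + 1 < sz ∧ d.getD (idx * 2) 0 > d.getD (idx * 2 + 1) 0
            · have hsw : sw = idx * 2 + 1 := by rw [hswdef]; unfold pvChoose; rw [if_pos hc]
              omega
            · have hsw : sw = idx * 2 := by rw [hswdef]; unfold pvChoose; rw [if_neg hc]
              rcases hior with h' | h' <;> omega
          have hbase : d.getD idx 0 ≤ d.getD sw 0 := by
            have : ¬ d.getD sw 0 < d.getD idx 0 := fun hl => hcond ⟨hswin, hl⟩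
            omega
          rw [hchild]
          by_cases hisw : i = sw
          · rw [hisw]; exact hbase
          · exact le_trans hbase (hswmin i hior (by omega) hisw)
        · exact hex i hi2 hilen hchild
    · rw [dif_neg hin]
      refine ⟨⟨hlen, ⟨hnn0, hpos⟩, ?_⟩, List.Perm.refl _, rfl⟩
      intro i hi2 hilen
      exact hex i hi2 hilen (by omega)

theorem getD_append_lt (l : List Int) (v : Int) (i : Nat) (h : i < l.length) :
    (l ++ [v]).getD i 0 = l.getD i 0 := by
  simp [List.getD_eq_getElem?_getD, List.getElem?_append_left h]

theorem getD_append_len (l : List Int) (v : Int) : (l ++ [v]).getD l.length 0 = v := by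
  simp [List.getD_eq_getElem?_getD]

theorem push_spec (d : List Int) (v : Int) (hinv : HeapInv d) (hv : 0 ≤ v) :
    HeapInv (pvPush d v) ∧ ((pvPush d v).drop 1).Perm (v :: d.drop 1) ∧
      (pvPush d v).length = d.length + 1 := by
  obtain ⟨hlen, ⟨hnn0, hpos⟩, hheap⟩ := hinv
  have h := siftUp_spec d.length (d ++ [v]) hlen (by simp)
    ⟨by rw [getD_append_lt d v 0 (by omega)]; exact hnn0, by
      intro i hi1 hilen
      rcases Nat.lt_or_ge i d.length with h' | h'
      · rw [getD_append_lt d v i h']; exact hpos i hi1 h'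
      · have hieq : i = d.length := by simp at hilen; omega
        rw [hieq, getD_append_len]; exact hv⟩
    (by
      intro i hi2 hilen hne
      have hilt : i < d.length := by simp at hilen; omega
      rw [getD_append_lt d v i hilt, getD_append_lt d v (i / 2) (by omega)]
      exact hheap i hi2 hilt)
    (by
      intro i hi2 hilen hhalf
      simp at hilen
      omega)
  rw [pvPush]
  have hidx : (d ++ [v]).length - 1 = d.length := by simp
  rw [hidx]
  refine ⟨h.1, ?_, by rw [h.2.2]; simp⟩
  refine h.2.1.trans ?_
  have hd1 : (d ++ [v]).drop 1 = d.drop 1 ++ [v] := by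
    cases d with
    | nil => simp at hlen
    | cons x t => simp
  rw [hd1]
  exact List.perm_append_singleton v (d.drop 1)

theorem pop_entry (d : List Int) (x : Int) (k : Nat) (hk : k < d.length - 1) :
    ((d.set 1 x).dropLast).getD k 0 = if k = 1 then x else d.getD k 0 := by
  have h1 : k < ((d.set 1 x).dropLast).length := by simp; omega
  rw [List.getD_eq_getElem _ 0 h1, List.getElem_dropLast]
  by_cases hk1 : k = 1
  · subst hk1
    rw [if_pos rfl]
    rw [List.getElem_set_self]
  · rw [if_neg hk1, List.getElem_set_ne (by omega)]
    rw [List.getD_eq_getElem _ 0 (by omega)]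

theorem cons_last_dropLast_perm (l : List Int) (hl : l ≠ []) :
    (l.getD (l.length - 1) 0 :: l.dropLast).Perm l := by
  conv_rhs => rw [← List.dropLast_append_getLast hl]
  have hx : l.getD (l.length - 1) 0 = l.getLast hl := by
    rw [List.getD_eq_getElem _ 0 (by have := List.length_pos_iff.mpr hl; omega),
      List.getLast_eq_getElem]
  rw [hx]
  exact (List.perm_append_singleton _ _).symm

theorem set_dropLast_drop_perm (d : List Int) (hlen : 2 ≤ d.length) :
    (((d.set 1 (d.getD (d.length - 1) 0)).dropLast).drop 1).Perm (d.drop 2) := by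
  match d with
  | a :: b :: rest =>
    cases rest with
    | nil => simp
    | cons c rs =>
      have hx : (a :: b :: c :: rs : List Int).getD ((a :: b :: c :: rs).length - 1) 0 =
          (c :: rs).getD ((c :: rs).length - 1) 0 := by
        simp [List.getD_eq_getElem?_getD]
        rfl
      have hstruct : (((a :: b :: c :: rs).set 1 ((a :: b :: c :: rs).getD ((a :: b :: c :: rs).length - 1) 0)).dropLast).drop 1 =
          ((c :: rs).getD ((c :: rs).length - 1) 0) :: (c :: rs).dropLast := by
        rw [hx]
        simp [List.dropLast_cons₂]
      rw [hstruct]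
      have hd2 : (a :: b :: c :: rs : List Int).drop 2 = c :: rs := by simp
      rw [hd2]
      exact cons_last_dropLast_perm (c :: rs) (by simp)

theorem pop_spec (d : List Int) (hinv : HeapInv d) (hlen : 2 ≤ d.length) :
    HeapInv (pvPop d) ∧ ((pvPop d).drop 1).Perm (d.drop 2) ∧
      (pvPop d).length = d.length - 1 := by
  obtain ⟨hlen1, ⟨hnn0, hpos⟩, hheap⟩ := hinv
  rw [pvPop, if_pos (by omega)]
  set x := d.getD (d.length - 1) 0 with hxdef
  set d1 := (d.set 1 x).dropLast with hd1def
  have hlen1' : d1.length = d.length - 1 := by simp [hd1def]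
  have hentry : ∀ k, k < d.length - 1 → d1.getD k 0 = if k = 1 then x else d.getD k 0 :=
    fun k hk => pop_entry d x k hk
  have h := siftDown_spec d1.length d1.length d1 1 (by omega) rfl le_rfl (by omega)
    ⟨by rw [hentry 0 (by omega), if_neg (by omega)]; exact hnn0, by
      intro i hi1 hilen
      rw [hlen1'] at hilen
      rw [hentry i hilen]
      split_ifs
      · exact hpos (d.length - 1) (by omega) (by omega)
      · exact hpos i hi1 (by omega)⟩
    (by
      intro i hi2 hilen hci
      rw [hlen1'] at hilen
      have hi4 : i / 2 ≠ 1 := hci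
      rw [hentry i hilen, hentry (i / 2) (by omega), if_neg hi4, if_neg (by omega : ¬ i = 1)]
      exact hheap i hi2 (by omega))
    (by intro i _ _ _ h2; omega)
  refine ⟨h.1, ?_, by omega⟩
  exact h.2.1.trans (set_dropLast_drop_perm d hlen)

theorem pvIns_perm (s : Int) (l : List Int) : (pvIns s l).Perm (s :: l) := by
  induction l with
  | nil => rfl
  | cons x xs ih =>
    simp only [pvIns]; split
    · exact (ih.cons x).trans (List.Perm.swap s x xs)
    · rfl

theorem pvIns_pairwise (s : Int) (l : List Int) (h : l.Pairwise (· ≤ ·)) :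
    (pvIns s l).Pairwise (· ≤ ·) := by
  induction l with
  | nil => simp [pvIns]
  | cons x xs ih =>
    rw [List.pairwise_cons] at h
    simp only [pvIns]
    split
    · rename_i hlt
      rw [List.pairwise_cons]
      refine ⟨?_, ih h.2⟩
      intro y hy
      rcases List.mem_cons.mp ((pvIns_perm s xs).mem_iff.mp hy) with h' | h'
      · rw [h']; omega
      · exact h.1 y h'
    · rename_i hge
      rw [List.pairwise_cons]
      refine ⟨?_, List.pairwise_cons.mpr h⟩
      intro y hy
      rcases List.mem_cons.mp hy with h' | h'
      · rw [h']; omega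
      · exact le_trans (by omega) (h.1 y h')

theorem drop_one_eq_cons (d : List Int) (h : 2 ≤ d.length) :
    d.drop 1 = d.getD 1 0 :: d.drop 2 := by
  rw [List.getD_eq_getElem _ 0 (by omega)]
  rw [List.drop_eq_getElem_cons (by omega : 1 < d.length)]

theorem head_eq_root (d : List Int) (hinv : HeapInv d) (a : Int) (t : List Int)
    (hperm : (a :: t).Perm (d.drop 1)) (hsort : (a :: t).Pairwise (· ≤ ·)) :
    d.getD 1 0 = a := by
  obtain ⟨hlen1, ⟨hnn0, hpos⟩, hheap⟩ := hinv
  have hdl : 1 ≤ (d.drop 1).length := by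
    rw [← hperm.length_eq]; simp
  have hlen2 : 2 ≤ d.length := by simp at hdl; omega
  have hdd := drop_one_eq_cons d hlen2
  have hmem : d.getD 1 0 ∈ a :: t := by
    rw [hperm.mem_iff, hdd]
    exact List.mem_cons_self ..
  have hle1 : a ≤ d.getD 1 0 := by
    rcases List.mem_cons.mp hmem with h' | h'
    · omega
    · exact (List.pairwise_cons.mp hsort).1 _ h'
  have hle2 : d.getD 1 0 ≤ a := by
    have hamem : a ∈ d.drop 1 := hperm.mem_iff.mp (List.mem_cons_self ..)
    obtain ⟨k, hk, hka⟩ := List.mem_iff_getElem.mp hamem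
    rw [List.getElem_drop] at hka
    have hk' : 1 + k < d.length := by simp at hk; omega
    have hgk : d.getD (1 + k) 0 = a := by
      rw [List.getD_eq_getElem _ 0 hk']; exact hka
    rw [← hgk]
    exact heap_min d hheap (1 + k) (by omega) hk'
  omega

theorem loop_eq : ∀ (fuel : Nat) (d l : List Int) (res : Int),
    HeapInv d → (d.drop 1).length + 1 ≤ fuel →
    l.Perm (d.drop 1) → l.Pairwise (· ≤ ·) →
    pvLoop fuel d res = pvMerge l res := by
  intro fuel
  induction fuel with
  | zero => intro d l res _ hfuel _ _; omega
  | succ fuel IH =>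
    intro d l res hinv hfuel hperm hsort
    obtain ⟨hlen1, ⟨hnn0, hpos⟩, hheap⟩ := hinv
    have hlendrop : (d.drop 1).length = d.length - 1 := by simp
    cases l with
    | nil =>
      have hnil : d.drop 1 = [] := hperm.symm.eq_nil
      have hlend : d.length = 1 := by
        have := congrArg List.length hnil; simp at this; omega
      rw [pvLoop, if_pos (by rw [pvTop, if_pos hlend])]
      simp [pvMerge]
    | cons a l' =>
      have hlen2 : 2 ≤ d.length := by
        have := hperm.length_eq; simp at this; omega
      have htop : pvTop d = a := by
        rw [pvTop, if_neg (by omega)]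
        exact head_eq_root d ⟨hlen1, ⟨hnn0, hpos⟩, hheap⟩ a l' hperm hsort
      have ha0 : 0 ≤ a := by
        rw [← htop, pvTop, if_neg (by omega)]
        exact hpos 1 le_rfl (by omega)
      have hne : ¬ pvTop d = -1 := by rw [htop]; omega
      obtain ⟨hinv1, hperm1, hlenp1⟩ := pop_spec d ⟨hlen1, ⟨hnn0, hpos⟩, hheap⟩ hlen2
      cases l' with
      | nil =>
        -- one element left: the second top is the -1 sentinel and A stops; B returns res too
        have hd2 : d.length = 2 := by
          have := hperm.length_eq; simp at this; omega
        have hp1 : (pvPop d).length = 1 := by omega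
        simp only [pvLoop]
        rw [if_neg hne, if_pos (show pvTop (pvPop d) = -1 by rw [pvTop, if_pos hp1])]
        simp [pvMerge]
      | cons b rest =>
        have hlen3 : 3 ≤ d.length := by
          have := hperm.length_eq; simp at this; omega
        have hg1 : d.getD 1 0 = a := by rw [← htop, pvTop, if_neg (by omega)]
        have hperm2 : (b :: rest).Perm ((pvPop d).drop 1) := by
          have hdd : d.drop 1 = a :: d.drop 2 := by
            rw [drop_one_eq_cons d hlen2, hg1]
          have hthis : (a :: b :: rest).Perm (a :: d.drop 2) := by rw [← hdd]; exact hperm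
          exact (hthis.cons_inv).trans hperm1.symm
        have hsort2 : (b :: rest).Pairwise (· ≤ ·) := (List.pairwise_cons.mp hsort).2
        have htop2 : pvTop (pvPop d) = b := by
          rw [pvTop, if_neg (by omega)]
          exact head_eq_root (pvPop d) hinv1 b rest hperm2 hsort2
        have hb0 : 0 ≤ b := by
          rw [← htop2, pvTop, if_neg (by omega)]
          exact hinv1.2.1.2 1 le_rfl (by omega)
        have hne2 : ¬ pvTop (pvPop d) = -1 := by rw [htop2]; omega
        obtain ⟨hinv2, hperm3, hlenp2⟩ := pop_spec (pvPop d) hinv1 (by omega)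
        have hperm4 : ((pvPop (pvPop d)).drop 1).Perm rest := by
          have hg2 : (pvPop d).getD 1 0 = b := by rw [← htop2, pvTop, if_neg (by omega)]
          have hdd1 : (pvPop d).drop 1 = b :: (pvPop d).drop 2 := by
            rw [drop_one_eq_cons (pvPop d) (by omega), hg2]
          have hthis : (b :: rest).Perm (b :: (pvPop d).drop 2) := by rw [← hdd1]; exact hperm2
          exact hperm3.trans hthis.cons_inv.symm
        obtain ⟨hinv3, hperm5, hlenp3⟩ := push_spec (pvPop (pvPop d)) (a + b) hinv2 (by omega)
        have hfinal : (pvIns (a + b) rest).Perm ((pvPush (pvPop (pvPop d)) (a + b)).drop 1) := by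
          refine (pvIns_perm (a + b) rest).trans ?_
          refine ((hperm4.symm).cons (a + b)).trans ?_
          exact hperm5.symm
        have hlenfinal : ((pvPush (pvPop (pvPop d)) (a + b)).drop 1).length + 1 ≤ fuel := by
          have h1 : (pvPush (pvPop (pvPop d)) (a + b)).length = d.length - 1 := by omega
          simp [h1]
          omega
        have hrest : rest.Pairwise (· ≤ ·) := (List.pairwise_cons.mp hsort2).2
        simp only [pvLoop]
        rw [if_neg hne, if_neg hne2, htop, htop2]
        rw [IH (pvPush (pvPop (pvPop d)) (a + b)) (pvIns (a + b) rest) (res + (a + b))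
          hinv3 hlenfinal hfinal (pvIns_pairwise (a + b) rest hrest)]
        simp [pvMerge]

theorem foldl_push_spec : ∀ (ws : List Int) (acc : List Int), (∀ w ∈ ws, 0 ≤ w) →
    HeapInv acc →
    HeapInv (ws.foldl pvPush acc) ∧ ((ws.foldl pvPush acc).drop 1).Perm (ws ++ acc.drop 1) := by
  intro ws
  induction ws with
  | nil => intro acc _ hinv; exact ⟨hinv, by simp⟩
  | cons w ws IH =>
    intro acc hws hinv
    obtain ⟨hinv', hperm', _⟩ := push_spec acc w hinv (hws w (List.mem_cons_self ..))
    obtain ⟨hinv'', hperm''⟩ :=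
      IH (pvPush acc w) (fun x hx => hws x (List.mem_cons_of_mem w hx)) hinv'
    refine ⟨by simpa using hinv'', ?_⟩
    have h2 : (ws ++ (pvPush acc w).drop 1).Perm (ws ++ (w :: acc.drop 1)) :=
      List.Perm.append_left ws hperm'
    have h3 : (ws ++ (w :: acc.drop 1)).Perm (w :: (ws ++ acc.drop 1)) := List.perm_middle
    simp only [List.foldl_cons, List.cons_append]
    exact (hperm''.trans h2).trans h3

-- ===== VERDICT (by name: the statement is the Claim_ definition above) =====
theorem getMinForce_spec : Claim_equal_getMinForce := by
  intro weights _ hpre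
  unfold Spec_getMinForce getMinForce getMinForce_alt
  have hinv0 : HeapInv [0] := by
    refine ⟨by simp, ⟨rfl, ?_⟩, ?_⟩ <;> intro i h1 h2 <;> simp at h2 <;> omega
  obtain ⟨hinv, hperm⟩ := foldl_push_spec weights [0] hpre hinv0
  have hlen : ((weights.foldl pvPush [0]).drop 1).length = weights.length := by
    have := hperm.length_eq; simpa using this
  refine loop_eq _ _ _ _ hinv (by omega) ?_ ?_
  · exact (PySem.List.sorted_perm ..).trans (by simpa using hperm.symm)
  · simpa using PySem.List.sorted_pairwise weights (fun x => x)
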